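-- pv_equiv track=rewrite | github.com/Khempawin/scientific-image-caption-pair | batch-scripts/__00_extract_image_caption/extract_image_caption_mpi.py | partition_sequence
-- ===== SOURCE A (Python) =====
-- from typing import List, TypedDict, Any, Optional
--
-- def partition_sequence(input_list: List[Any], n_partition: int):
--     total = len(input_list)
--     base_partition_size = int(total / n_partition)
--     partition_size_list = [base_partition_size] * n_partition
--     remainder = total % n_partition
--     # divide remainder amoung partitions
--     index = 0
--     while(remainder > 0):
--         partition_size_list[index] += 1
--         remainder -= 1
--         index += 1
--
--     partition_list = list()
--     start_index = 0
--     for size in partition_size_list: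
--         partition_list.append(input_list[start_index: start_index+size])
--         start_index += size
--
--     # return list of list(partition)
--     return partition_list
-- ===== SOURCE B (Python) =====
-- def partition_sequence(input_list, n_partition):
--     total = len(input_list)
--     base = int(total / n_partition)
--     rem = total % n_partition
--     return [input_list[i * base + min(i, rem):(i + 1) * base + min(i + 1, rem)]
--             for i in range(n_partition)]
-- ===== Notes on version B (the rewrite author's own statement) =====
-- stated objective: simpler
-- what changed: Replaces A's size-list construction, remainder-distribution while loop and accumulating fold by a single comprehension that computes each slice's boundaries in closed form (i*base + min(i, rem)).
import Mathlib
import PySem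

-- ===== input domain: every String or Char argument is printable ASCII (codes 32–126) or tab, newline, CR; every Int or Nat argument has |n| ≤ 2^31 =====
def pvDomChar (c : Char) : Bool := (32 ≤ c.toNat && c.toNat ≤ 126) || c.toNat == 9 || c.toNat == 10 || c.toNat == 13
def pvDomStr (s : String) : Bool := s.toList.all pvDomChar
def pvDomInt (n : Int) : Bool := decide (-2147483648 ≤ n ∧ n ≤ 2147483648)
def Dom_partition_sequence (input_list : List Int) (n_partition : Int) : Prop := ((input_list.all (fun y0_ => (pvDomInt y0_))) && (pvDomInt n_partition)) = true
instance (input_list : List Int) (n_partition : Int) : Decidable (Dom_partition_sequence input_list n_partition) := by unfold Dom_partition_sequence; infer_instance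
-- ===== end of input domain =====

-- B replaces A's size list + remainder while loop + accumulating fold by one comprehension
-- with closed-form slice boundaries (simpler decomposition, same cost).


-- ===== PORT A =====
-- the while loop: runs `remainder` times (fuel = remainder.toNat), each pass does
-- partition_size_list[index] += 1; index += 1
def psDistribute (lst : List Int) (fuel : Nat) (index : Int) : List Int :=
  match fuel with
  | 0 => lst
  | r + 1 =>
      psDistribute (PySem.List.pySetD lst index (PySem.List.pyGetD lst index 0 + 1)) r (index + 1)

def partition_sequence (input_list : List Int) (n_partition : Int) : List (List Int) :=
  let total : Int := input_list.length
  let base_partition_size := PySem.Int.truncdiv total n_partition   -- int(total / n_partition)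
  let partition_size_list := List.replicate n_partition.toNat base_partition_size
  let remainder := PySem.Int.mod total n_partition
  let partition_size_list := psDistribute partition_size_list remainder.toNat 0
  let res := partition_size_list.foldl
    (fun (acc : List (List Int) × Int) size =>
      (acc.1 ++ [PySem.List.slice input_list (some acc.2) (some (acc.2 + size))], acc.2 + size))
    ([], 0)
  res.1

-- ===== PORT B =====
def partition_sequence_alt (input_list : List Int) (n_partition : Int) : List (List Int) :=
  let total : Int := input_list.length
  let base := PySem.Int.truncdiv total n_partition
  let rem := PySem.Int.mod total n_partition
  (PySem.List.pyRange 0 n_partition 1).map (fun i =>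
    PySem.List.slice input_list (some (i * base + min i rem))
      (some ((i + 1) * base + min (i + 1) rem)))

-- ===== PRECONDITION & SPEC =====
-- Pre_ excludes exactly n_partition = 0, where Python A raises ZeroDivisionError.
def Pre_partition_sequence (input_list : List Int) (n_partition : Int) : Prop := n_partition ≠ 0
instance (input_list : List Int) (n_partition : Int) : Decidable (Pre_partition_sequence input_list n_partition) := by unfold Pre_partition_sequence; infer_instance
def pvWitness_partition_sequence : List Int × Int := ([1, 2, 3, 4, 5], 2)

def Spec_partition_sequence (input_list : List Int) (n_partition : Int) (out : List (List Int)) : Prop := out = partition_sequence_alt input_list n_partition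
instance (input_list : List Int) (n_partition : Int) (out : List (List Int)) : Decidable (Spec_partition_sequence input_list n_partition out) := by unfold Spec_partition_sequence; infer_instance

-- ===== CLAIM (what is proved, stated in full; the proofs are below) =====
def Claim_equal_partition_sequence : Prop := ∀ (input_list : List Int) (n_partition : Int), Dom_partition_sequence input_list n_partition → Pre_partition_sequence input_list n_partition → Spec_partition_sequence input_list n_partition (partition_sequence input_list n_partition)

-- ===== LEMMAS AND PROOFS =====

-- proof-only helper: psSlices xs S s = the slices of xs of sizes S starting at s
def psSlices (xs : List Int) : List Int → Int → List (List Int)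
  | [], _ => []
  | a :: S, s => PySem.List.slice xs (some s) (some (s + a)) :: psSlices xs S (s + a)

theorem ps_fold_eq_psSlices (xs : List Int) :
    ∀ (S : List Int) (acc : List (List Int)) (s : Int),
    (S.foldl (fun (acc : List (List Int) × Int) size =>
        (acc.1 ++ [PySem.List.slice xs (some acc.2) (some (acc.2 + size))], acc.2 + size))
      (acc, s)).1 = acc ++ psSlices xs S s := by
  intro S
  induction S with
  | nil => intro acc s; simp [psSlices]
  | cons a S ih =>
      intro acc s
      simp only [List.foldl_cons, psSlices, ih]
      simp

theorem psDistribute_spec :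
    ∀ (k : Nat) (pre post : List Int), k ≤ post.length →
    psDistribute (pre ++ post) k (pre.length : Int)
      = pre ++ (post.take k).map (· + 1) ++ post.drop k := by
  intro k
  induction k with
  | zero => intro pre post _; simp [psDistribute]
  | succ r ih =>
      intro pre post hk
      match post with
      | a :: post' =>
          simp only [psDistribute]
          have hset : PySem.List.pySetD (pre ++ a :: post') (pre.length : Int)
              (PySem.List.pyGetD (pre ++ a :: post') (pre.length : Int) 0 + 1)
              = (pre ++ [a + 1]) ++ post' := by
            rw [PySem.List.pySetD_natCast, PySem.List.pyGetD_natCast,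
              List.set_append_right _ _ (le_refl pre.length)]
            simp [List.getD_eq_getElem?_getD]
          rw [hset]
          have hlen : ((pre.length : Int) + 1) = (((pre ++ [a + 1]).length : Nat) : Int) := by
            simp
          rw [hlen, ih (pre ++ [a + 1]) post' (by simpa using hk)]
          simp [List.append_assoc]

theorem psSlices_range (xs : List Int) :
    ∀ (N : Nat) (k : Nat) (start : Nat → Int),
    psSlices xs ((List.range N).map (fun i => start (k + i + 1) - start (k + i))) (start k)
      = (List.range N).map (fun i =>
          PySem.List.slice xs (some (start (k + i))) (some (start (k + i + 1)))) := by
  intro N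
  induction N with
  | zero => intro k start; simp [psSlices]
  | succ N ih =>
      intro k start
      rw [List.range_succ_eq_map]
      simp only [List.map_cons, List.map_map, psSlices]
      have h1 : start k + (start (k + 0 + 1) - start (k + 0)) = start (k + 1) := by
        simp
      rw [h1]
      have h2 : ((fun i => start (k + i + 1) - start (k + i)) ∘ Nat.succ)
          = fun i => start ((k + 1) + i + 1) - start ((k + 1) + i) := by
        funext i
        simp [Function.comp, Nat.succ_eq_add_one]
        ring_nf
      rw [h2, ih (k + 1) start]
      congr 1
      apply List.map_congr_left
      intro i _
      have e1 : k + 1 + i = k + (i + 1) := by omega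
      simp [Function.comp, Nat.succ_eq_add_one, e1]

theorem sizes_as_range (c : Int) (N k : Nat) (hk : k ≤ N) :
    (((List.replicate N c).take k).map (· + 1)) ++ (List.replicate N c).drop k
      = (List.range N).map (fun i => if i < k then c + 1 else c) := by
  rw [List.take_replicate, List.drop_replicate, List.map_replicate]
  apply List.ext_getElem
  · simp; omega
  · intro i h1 h2
    simp only [List.getElem_map, List.getElem_range]
    by_cases hi : i < k
    · rw [List.getElem_append_left (by simp; omega)]
      simp [hi]
    · rw [List.getElem_append_right (by simp; omega)]
      simp [hi]

theorem partition_sequence_eq (input_list : List Int) (n_partition : Int)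
    (hn : n_partition ≠ 0) :
    partition_sequence input_list n_partition = partition_sequence_alt input_list n_partition := by
  unfold partition_sequence partition_sequence_alt
  simp only []
  set total : Int := (input_list.length : Int) with htotal
  set base := PySem.Int.truncdiv total n_partition with hbase
  set r := PySem.Int.mod total n_partition with hr
  rcases lt_or_gt_of_ne hn with hneg | hpos
  · -- n_partition < 0: both sides are []
    have hN : n_partition.toNat = 0 := Int.toNat_of_nonpos (le_of_lt hneg)
    have hrle : r ≤ 0 := (PySem.Int.mod_neg_bounds total hneg).2
    have hr0 : r.toNat = 0 := Int.toNat_of_nonpos hrle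
    rw [hN, hr0]
    simp only [List.replicate_zero, psDistribute, List.foldl_nil]
    rw [PySem.List.pyRange_one]
    have : ((n_partition - 0).toNat) = 0 := by omega
    rw [this]
    simp
  · -- n_partition > 0
    have hr0 : 0 ≤ r := PySem.Int.mod_nonneg total hpos
    have hrlt : r < n_partition := PySem.Int.mod_lt total hpos
    set N := n_partition.toNat with hNdef
    set k := r.toNat with hkdef
    have hkN : k ≤ N := by omega
    -- the closed-form start function
    set start : Nat → Int := fun i => (i : Int) * base + min (i : Int) r with hstart
    -- A's distributed size list
    have hdist : psDistribute (List.replicate N base) r.toNat 0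
        = ((List.replicate N base).take k).map (· + 1) ++ (List.replicate N base).drop k := by
      have := psDistribute_spec k ([] : List Int) (List.replicate N base) (by simp [hkN])
      simpa using this
    rw [hdist, sizes_as_range base N k hkN]
    -- sizes are the telescoping differences of start
    have hsizes : (List.range N).map (fun i => if i < k then base + 1 else base)
        = (List.range N).map (fun i => start (0 + i + 1) - start (0 + i)) := by
      apply List.map_congr_left
      intro i _
      simp only [hstart, Nat.zero_add]
      have hmin : min ((i : Int) + 1) r = min (i : Int) r + (if (i : Int) < r then 1 else 0) := by
        split_ifs <;> omega
      push_cast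
      rw [hmin]
      by_cases hik : i < k
      · have : (i : Int) < r := by omega
        simp [hik, this]; ring
      · have : ¬ (i : Int) < r := by omega
        simp [hik, this]; ring
    rw [hsizes, ps_fold_eq_psSlices, List.nil_append]
    have hs0 : (0 : Int) = start 0 := by simp [hstart]; omega
    conv_lhs => rw [hs0, psSlices_range input_list N 0 start]
    -- B's side
    rw [PySem.List.pyRange_one]
    have hNN : ((n_partition - 0).toNat) = N := by omega
    rw [hNN, List.map_map]
    apply List.map_congr_left
    intro i _
    simp only [Function.comp, hstart, Nat.zero_add]
    push_cast
    ring_nf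

-- ===== VERDICT (by name: the statement is the Claim_ definition above) =====
theorem partition_sequence_spec : Claim_equal_partition_sequence := by
  intro input_list n_partition _ hpre
  exact partition_sequence_eq input_list n_partition hpre
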